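-- pv_equiv track=rewrite | github.com/tracysiyuchen/urban-mobility-topology | src/train_dual_graph.py | group_keys_by_day
-- ===== SOURCE A (Python) =====
-- from collections import defaultdict
--
-- TIME_BIN_ORDER = ["Morning_Peak", "Midday", "Evening_Peak", "Night_early", "Night_late"]
--
-- def group_keys_by_day(keys: list) -> dict:
--     """
--     Group snapshot keys by date, sorted by time-bin order within each day.
--
--     Keys have format: "2016-01-05_Morning_Peak"
--     Returns: {date_str: [key_1, key_2, ...]} ordered by TIME_BIN_ORDER
--     """
--     day_map = defaultdict(list)
--     for key in keys:
--         # Key format: "2016-01-05_Morning_Peak"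
--         # Date uses dashes, so split on FIRST underscore only
--         date_str, time_bin = key.split("_", 1)   # "2016-01-05", "Morning_Peak"
--         day_map[date_str].append((time_bin, key))
--
--     # Sort each day's snapshots by canonical time-bin order
--     order_map = {tb: i for i, tb in enumerate(TIME_BIN_ORDER)}
--     result = {}
--     for date_str, items in day_map.items():
--         items.sort(key=lambda x: order_map.get(x[0], 99))
--         result[date_str] = [key for _, key in items]
--
--     return result
-- ===== SOURCE B (Python) =====
-- TIME_BIN_ORDER = ["Morning_Peak", "Midday", "Evening_Peak", "Night_early", "Night_late"]
-- _ORDER_INDEX = {tb: i for i, tb in enumerate(TIME_BIN_ORDER)}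
--
-- def group_keys_by_day(keys: list) -> dict:
--     """Bucket placement instead of sorting: route each key into its date's
--     per-time-bin slot (unknown bins go to a trailing slot), then emit each
--     date's slots in canonical order."""
--     n = len(TIME_BIN_ORDER)
--     buckets = {}
--     for key in keys:
--         date_str, time_bin = key.split("_", 1)
--         slots = buckets.get(date_str)
--         if slots is None:
--             slots = [[] for _ in range(n + 1)]
--             buckets[date_str] = slots
--         slots[_ORDER_INDEX.get(time_bin, n)].append(key)
--     return {date: [k for slot in slots for k in slot]
--             for date, slots in buckets.items()}
-- ===== Notes on version B (the rewrite author's own statement) =====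
-- stated objective: alternative
-- what changed: Replaces the per-day comparison sort over (time_bin, key) tuples with single-pass bucket placement: each key is appended to its date's slot indexed by canonical time-bin position (unknown bins into a trailing slot), and each day's list is emitted by concatenating the slots in canonical order.
import Mathlib
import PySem

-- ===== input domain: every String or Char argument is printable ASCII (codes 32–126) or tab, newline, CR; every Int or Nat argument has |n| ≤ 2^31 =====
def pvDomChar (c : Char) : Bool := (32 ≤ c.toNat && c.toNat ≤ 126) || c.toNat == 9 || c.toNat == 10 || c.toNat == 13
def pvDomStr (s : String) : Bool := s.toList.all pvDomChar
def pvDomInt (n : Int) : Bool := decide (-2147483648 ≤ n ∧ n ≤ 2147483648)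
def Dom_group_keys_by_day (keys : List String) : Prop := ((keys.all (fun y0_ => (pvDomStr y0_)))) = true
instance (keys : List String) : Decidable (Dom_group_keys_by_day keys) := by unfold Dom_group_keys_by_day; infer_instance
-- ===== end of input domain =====

-- B replaces A's per-day comparison sort over (time_bin, key) tuples by bucket
-- placement into canonical time-bin slots (unknown bins into a trailing slot);
-- objective: alternative algorithm, same observable return value.

-- module-level constant TIME_BIN_ORDER (shared by A and B, as in the Python module)
def pvTimeBinOrder : List String := ["Morning_Peak", "Midday", "Evening_Peak", "Night_early", "Night_late"]

-- key.split("_", 1): shared helper (the Python `date_str, time_bin = key.split("_", 1)`);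
-- .getD [] only packages the Option (splitMax? with a non-empty sep is never none)
def pvParts (key : String) : List String := (PySem.Str.splitMax? key "_" 1).getD []

-- ===== PORT A =====
def group_keys_by_day (keys : List String) : List (String × List String) :=
  let day_map : PySem.Dict String (List (String × String)) :=
    keys.foldl (fun d key =>
      match pvParts key with
      | [date_str, time_bin] => d.modify date_str [] (fun l => l ++ [(time_bin, key)])
      | _ => d) PySem.Dict.empty
  let order_map : PySem.Dict String Int :=
    (PySem.List.enumerate pvTimeBinOrder).foldl (fun d p => d.insert p.2 p.1) PySem.Dict.empty
  let result : PySem.Dict String (List String) :=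
    day_map.items.foldl (fun r p =>
      r.insert p.1 ((PySem.List.sorted p.2 (fun x => order_map.getD x.1 99)).map (fun x => x.2)))
      PySem.Dict.empty
  result.items

-- ===== PORT B =====
-- module-level _ORDER_INDEX = {tb: i for i, tb in enumerate(TIME_BIN_ORDER)}
def pvOrderIndex : PySem.Dict String Int :=
  (PySem.List.enumerate pvTimeBinOrder).foldl (fun d p => d.insert p.2 p.1) PySem.Dict.empty

def group_keys_by_day_alt (keys : List String) : List (String × List String) :=
  let n : Nat := pvTimeBinOrder.length
  let buckets : PySem.Dict String (List (List String)) :=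
    keys.foldl (fun d key =>
      -- `date_str, time_bin = key.split("_", 1)`: the unpacking succeeds iff there are
      -- exactly two pieces (guaranteed by Pre_); the guard only totalises the port
      let ps := pvParts key
      if ps.length = 2 then
        let date_str := ps.getD 0 ""
        let time_bin := ps.getD 1 ""
        -- slots[_ORDER_INDEX.get(time_bin, n)].append(key); the stored indices are 0..n-1
        -- and the default is n, so .toNat is exact (never applied to a negative)
        let i : Nat := (pvOrderIndex.getD time_bin (n : Int)).toNat
        d.modify date_str (List.replicate (n + 1) [])
          (fun slots => slots.set i (slots.getD i [] ++ [key]))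
      else d) PySem.Dict.empty
  (buckets.items.foldl (fun r p => r.insert p.1 p.2.flatten) PySem.Dict.empty).items

-- ===== PRECONDITION & SPEC =====
-- Pre_ excludes keys with no underscore: there `key.split("_", 1)` yields one piece and the
-- unpacking `date_str, time_bin = ...` raises ValueError in A (and in B alike).
def Pre_group_keys_by_day (keys : List String) : Prop :=
  ∀ key ∈ keys, (pvParts key).length = 2
instance (keys : List String) : Decidable (Pre_group_keys_by_day keys) := by
  unfold Pre_group_keys_by_day; infer_instance

def pvWitness_group_keys_by_day : List String :=
  ["2016-01-05_Morning_Peak", "2016-01-05_Midday", "2016-01-06_Night_late", "2016-01-05_Odd_Bin"]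

def Spec_group_keys_by_day (keys : List String) (out : List (String × List String)) : Prop := out = group_keys_by_day_alt keys
instance (keys : List String) (out : List (String × List String)) : Decidable (Spec_group_keys_by_day keys out) := by unfold Spec_group_keys_by_day; infer_instance

-- ===== CLAIM (what is proved, stated in full; the proofs are below) =====
def Claim_equal_group_keys_by_day : Prop := ∀ (keys : List String), Dom_group_keys_by_day keys → Pre_group_keys_by_day keys → Spec_group_keys_by_day keys (group_keys_by_day keys)

-- ===== LEMMAS AND PROOFS =====

-- proof-side names for the two halves of a split key
def pvDate (key : String) : String := (pvParts key).getD 0 ""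
def pvBin (key : String) : String := (pvParts key).getD 1 ""

-- the literal dict both enumerate-folds build
def pvOrderLit : PySem.Dict String Int :=
  PySem.Dict.mk [("Morning_Peak", 0), ("Midday", 1), ("Evening_Peak", 2), ("Night_early", 3), ("Night_late", 4)]

def pvRank (key : String) : Int := pvOrderLit.getD (pvBin key) 99
def pvIdx (key : String) : Nat := (pvOrderLit.getD (pvBin key) 5).toNat

lemma pvParts_eq {key : String} (h : (pvParts key).length = 2) :
    pvParts key = [pvDate key, pvBin key] := by
  unfold pvDate pvBin
  match hp : pvParts key with
  | [a, b] => simp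
  | [] => simp [hp] at h
  | [a] => simp [hp] at h
  | a :: b :: c :: t => simp [hp] at h

lemma pvOrderIndex_eq : pvOrderIndex = pvOrderLit := by decide

lemma pvIdx_le (key : String) : pvIdx key ≤ 5 := by
  simp [pvIdx, pvOrderLit, PySem.Dict.getD, PySem.Dict.get?_mk_cons]
  split_ifs <;> simp_all [PySem.Dict.get?]

-- the canonical-order value of a bin: pvRank = (if idx = 5 then 99 else idx)
lemma pvRank_eq (key : String) : pvRank key = (if pvIdx key = 5 then (99 : Int) else (pvIdx key : Int)) := by
  simp [pvRank, pvIdx, pvOrderLit, PySem.Dict.getD, PySem.Dict.get?_mk_cons]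
  split_ifs <;> simp_all [PySem.Dict.get?]

-- insertBy passes over a prefix it does not go before
lemma insertBy_append_not_before {α : Type} (before : α → α → Bool) (x : α) (as bs : List α)
    (h : ∀ a ∈ as, before x a = false) :
    PySem.List.insertBy before x (as ++ bs) = as ++ PySem.List.insertBy before x bs := by
  induction as with
  | nil => simp
  | cons a as ih =>
      simp only [List.cons_append, PySem.List.insertBy, h a (by simp)]
      simp [ih (fun a ha => h a (by simp [ha]))]

-- insertBy goes before everything it beats
lemma insertBy_all_before {α : Type} (before : α → α → Bool) (x : α) (ys : List α)
    (h : ∀ y ∈ ys, before x y = true) :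
    PySem.List.insertBy before x ys = x :: ys := by
  cases ys with
  | nil => rfl
  | cons y ys => simp [PySem.List.insertBy, h y (by simp)]

-- inserting into a bucket-concatenation appends to the element's own bucket
lemma insertBy_flatMap {α : Type} (key : α → Int) (rs : List Int) (hrs : rs.Pairwise (· < ·))
    (F : Int → List α) (hF : ∀ r ∈ rs, ∀ y ∈ F r, key y = r) (x : α) (hx : key x ∈ rs) :
    PySem.List.insertBy (fun a b => decide (key a < key b)) x (rs.flatMap F)
      = rs.flatMap (fun r => if r = key x then F r ++ [x] else F r) := by
  induction rs with
  | nil => simp at hx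
  | cons r0 rest ih =>
      have hlt : ∀ r ∈ rest, r0 < r := (List.pairwise_cons.mp hrs).1
      by_cases h0 : r0 = key x
      · have h1 : ∀ a ∈ F r0, (fun a b => decide (key a < key b)) x a = false := by
          intro a ha
          have := hF r0 (by simp) a ha
          simp [this, ← h0]
        have h2 : ∀ y ∈ rest.flatMap F, (fun a b => decide (key a < key b)) x y = true := by
          intro y hy
          obtain ⟨r, hr, hyr⟩ := List.mem_flatMap.mp hy
          have := hF r (by simp [hr]) y hyr
          simp [this, ← h0]
          exact hlt r hr
        rw [List.flatMap_cons, insertBy_append_not_before _ _ _ _ h1,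
            insertBy_all_before _ _ _ h2, List.flatMap_cons, if_pos h0]
        have he : rest.flatMap (fun r => if r = key x then F r ++ [x] else F r) = rest.flatMap F := by
          apply List.flatMap_congr
          intro r hr
          have hne : r ≠ key x := by
            have := hlt r hr; omega
          simp [hne]
        rw [he]
        simp
      · have hxr : key x ∈ rest := by
          rcases List.mem_cons.mp hx with h | h
          · exact absurd h.symm h0
          · exact h
        have h1 : ∀ a ∈ F r0, (fun a b => decide (key a < key b)) x a = false := by
          intro a ha
          have hk := hF r0 (by simp) a ha
          have : r0 < key x := hlt _ hxr
          simp [hk]; omega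
        rw [List.flatMap_cons, insertBy_append_not_before _ _ _ _ h1,
            ih (List.pairwise_cons.mp hrs).2 (fun r hr => hF r (by simp [hr])) hxr,
            List.flatMap_cons, if_neg h0]

-- A stable sort whose keys all lie in a strictly increasing list rs is the
-- concatenation, over rs, of the key-preimage sublists (in original order).
lemma sorted_eq_flatMap_filter {α : Type} (key : α → Int) (rs : List Int)
    (hrs : rs.Pairwise (· < ·)) (xs : List α) (hmem : ∀ x ∈ xs, key x ∈ rs) :
    PySem.List.sorted xs key = rs.flatMap (fun r => xs.filter (fun x => key x == r)) := by
  induction xs using List.reverseRecOn with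
  | nil => simp [PySem.List.sorted_eq_foldl_insertBy]
  | append_singleton xs x ih =>
      have hxs : ∀ y ∈ xs, key y ∈ rs := fun y hy => hmem y (by simp [hy])
      rw [PySem.List.sorted_eq_foldl_insertBy, List.foldl_append, List.foldl_cons, List.foldl_nil,
          ← PySem.List.sorted_eq_foldl_insertBy, ih hxs]
      rw [insertBy_flatMap key rs hrs _ ?_ x (hmem x (by simp))]
      · apply List.flatMap_congr
        intro r _
        rw [List.filter_append]
        by_cases hr : r = key x
        · simp [hr]
        · have : (key x == r) = false := by simp [Ne.symm hr]
          simp [hr, this]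
      · intro r hr y hy
        have := List.of_mem_filter hy
        simpa using this

-- per-key value of a keyed modify-accumulate fold
lemma getD_foldl_modify_key_filter {κ ν β : Type} [BEq κ] [LawfulBEq κ] [DecidableEq κ]
    (l : List β) (key : β → κ) (d0 : ν) (f : β → ν → ν) (d : PySem.Dict κ ν) (c : κ) :
    (l.foldl (fun d x => d.modify (key x) d0 (f x)) d).getD c d0
      = (l.filter (fun x => key x == c)).foldl (fun v x => f x v) (d.getD c d0) := by
  induction l generalizing d with
  | nil => rfl
  | cons x l ih =>
      rw [List.foldl_cons, ih]
      by_cases h : c = key x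
      · subst h
        simp
      · rw [PySem.Dict.getD_modify, if_neg h, List.filter_cons]
        have : (key x == c) = false := by simp [Ne.symm h]
        simp [this]

-- the first-appearance-ordered date list both programs iterate over
def pvDates (keys : List String) : List String :=
  PySem.Set.update ([] : List String) (keys.map pvDate)

-- the sub-sequence of keys belonging to one date
def pvDayKeys (keys : List String) (c : String) : List String :=
  keys.filter (fun k => pvDate k == c)

-- the rank value of slot i (0..4 ↦ 0..4, the unknown slot 5 ↦ 99)
def pvSlotRank (i : Nat) : Int := if i = 5 then 99 else (i : Int)

lemma set_map_range {β : Type} (n : Nat) (g : Nat → β) (j : Nat) (x : β) (hj : j < n) :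
    ((List.range n).map g).set j x = (List.range n).map (fun i => if i = j then x else g i) := by
  apply List.ext_getElem (by simp)
  intro i h1 h2
  rcases eq_or_ne i j with h | h
  · subst h; simp
  · simp [h, Ne.symm h]

-- B's per-date slot loop, characterised
lemma slots_foldl (l : List String) (g : Nat → List String) :
    l.foldl (fun slots k => slots.set (pvIdx k) (slots.getD (pvIdx k) [] ++ [k]))
        ((List.range 6).map g)
      = (List.range 6).map (fun i => g i ++ l.filter (fun k => pvIdx k == i)) := by
  induction l generalizing g with
  | nil => simp
  | cons k l ih =>
      have hk : pvIdx k < 6 := Nat.lt_succ_of_le (pvIdx_le k)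
      rw [List.foldl_cons, PySem.List.getD_map_range _ _ _ _ hk, set_map_range 6 g _ _ hk, ih]
      apply List.map_congr_left
      intro i hi
      by_cases h : i = pvIdx k
      · subst h; simp
      · have hb : (pvIdx k == i) = false := by simp [Ne.symm h]
        simp [h, hb]

-- slot-index and rank pick out the same keys (i ranges over the six slots)
lemma rank_beq_idx (k : String) (i : Nat) (hi : i < 6) :
    ((pvOrderLit.getD (pvBin k) 99) == pvSlotRank i) = (pvIdx k == i) := by
  have hle := pvIdx_le k
  have hr := pvRank_eq k
  rw [Bool.eq_iff_iff]
  simp only [beq_iff_eq]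
  unfold pvRank at hr
  rw [hr]
  unfold pvSlotRank
  split_ifs <;> omega

-- the per-date value computed by A equals the per-date value computed by B
lemma value_eq (P : List String) :
    (PySem.List.sorted (P.map (fun k => ((pvBin k, k) : String × String)))
        (fun x => pvOrderLit.getD x.1 99)).map (fun x => x.2)
      = ((List.range 6).map (fun i => P.filter (fun k => pvIdx k == i))).flatten := by
  have hrs : ((List.range 6).map pvSlotRank).Pairwise (· < ·) := by decide
  have hmem : ∀ x ∈ P.map (fun k => ((pvBin k, k) : String × String)),
      (fun x : String × String => pvOrderLit.getD x.1 99) x ∈ (List.range 6).map pvSlotRank := by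
    intro x hx
    obtain ⟨k, hk, rfl⟩ := List.mem_map.mp hx
    have := pvRank_eq k
    unfold pvRank at this
    simp only
    rw [this]
    by_cases h5 : pvIdx k = 5
    · simp [h5]
      exact ⟨5, by omega, by unfold pvSlotRank; simp⟩
    · have := pvIdx_le k
      exact List.mem_map.mpr ⟨pvIdx k, by simp; omega, by unfold pvSlotRank; simp [h5]⟩
  rw [sorted_eq_flatMap_filter _ _ hrs _ hmem, List.map_flatMap, List.flatMap_map,
      ← List.flatMap_def]
  apply List.flatMap_congr
  intro i hi
  have hi6 : i < 6 := by simpa using hi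
  rw [List.filter_map]
  rw [List.map_map]
  rw [show ((fun x : String × String => pvOrderLit.getD x.1 99 == pvSlotRank i) ∘
        fun k => ((pvBin k, k) : String × String)) = (fun k => pvIdx k == i) from
      funext fun k => rank_beq_idx k i hi6]
  rw [show ((fun x : String × String => x.2) ∘ fun k => ((pvBin k, k) : String × String)) = id from
      funext fun k => rfl, List.map_id]

-- A's port, normalised
lemma portA_eq (keys : List String) (hpre : Pre_group_keys_by_day keys) :
    group_keys_by_day keys = (pvDates keys).map (fun c =>
      (c, (PySem.List.sorted ((pvDayKeys keys c).map (fun k => ((pvBin k, k) : String × String)))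
            (fun x => pvOrderLit.getD x.1 99)).map (fun x => x.2))) := by
  unfold group_keys_by_day
  have hday : keys.foldl (fun d key =>
        match pvParts key with
        | [date_str, time_bin] => d.modify date_str [] (fun l => l ++ [(time_bin, key)])
        | _ => d) PySem.Dict.empty
      = keys.foldl (fun d key => d.modify (pvDate key) [] (fun l => l ++ [(pvBin key, key)]))
          PySem.Dict.empty := by
    apply PySem.List.foldl_congr_mem
    intro acc x hx
    rw [pvParts_eq (hpre x hx)]
  have horder : (PySem.List.enumerate pvTimeBinOrder).foldl (fun d p => d.insert p.2 p.1)
      PySem.Dict.empty = pvOrderLit := by decide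
  rw [hday, horder]
  set dayC := keys.foldl (fun d key => d.modify (pvDate key) [] (fun l => l ++ [(pvBin key, key)]))
      PySem.Dict.empty with hdayC
  have hnodup : dayC.keys.Nodup := by
    rw [hdayC]
    exact PySem.Dict.nodup_keys_foldl_modify_key keys pvDate []
      (fun _ x => fun l => l ++ [(pvBin x, x)]) PySem.Dict.empty (by simp)
  have hfresh := PySem.Dict.items_foldl_insert_fresh dayC.items (fun p => p.1)
    (fun p => (PySem.List.sorted p.2 (fun x => pvOrderLit.getD x.1 99)).map (fun x => x.2))
    PySem.Dict.empty (fun a _ => PySem.Dict.contains_empty _) (by simpa [PySem.Dict.keys] using hnodup)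
  rw [hfresh]
  rw [PySem.Dict.items_eq_map_keys dayC hnodup []]
  have hkeys : dayC.keys = pvDates keys := by
    rw [hdayC]
    rw [PySem.Dict.keys_foldl_modify_key keys pvDate [] (fun _ x => fun l => l ++ [(pvBin x, x)])
      PySem.Dict.empty]
    simp [pvDates, PySem.Dict.keys_empty]
  rw [hkeys, List.map_map]
  have hitems : PySem.Dict.empty.items = ([] : List (String × List String)) := rfl
  rw [hitems, List.nil_append]
  apply List.map_congr_left
  intro c _
  have hgetD : dayC.getD c [] = (pvDayKeys keys c).map (fun k => ((pvBin k, k) : String × String)) := by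
    rw [hdayC, getD_foldl_modify_key_filter keys pvDate [] (fun x => fun l => l ++ [(pvBin x, x)])
      PySem.Dict.empty c, PySem.Dict.getD_empty,
      PySem.List.foldl_append_singleton_eq_map (fun k => ((pvBin k, k) : String × String))]
    rfl
  simp [Function.comp, hgetD]

-- B's port, normalised
lemma portB_eq (keys : List String) (hpre : Pre_group_keys_by_day keys) :
    group_keys_by_day_alt keys = (pvDates keys).map (fun c =>
      (c, ((List.range 6).map (fun i => (pvDayKeys keys c).filter (fun k => pvIdx k == i))).flatten)) := by
  simp only [group_keys_by_day_alt]
  have hbuck : keys.foldl (fun d key =>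
        if (pvParts key).length = 2 then
          d.modify ((pvParts key).getD 0 "") (List.replicate (pvTimeBinOrder.length + 1) [])
            (fun slots => slots.set ((pvOrderIndex.getD ((pvParts key).getD 1 "") (pvTimeBinOrder.length : Int)).toNat)
              (slots.getD ((pvOrderIndex.getD ((pvParts key).getD 1 "") (pvTimeBinOrder.length : Int)).toNat) [] ++ [key]))
        else d) PySem.Dict.empty
      = keys.foldl (fun d key => d.modify (pvDate key) (List.replicate 6 [])
          (fun slots => slots.set (pvIdx key) (slots.getD (pvIdx key) [] ++ [key])))
          PySem.Dict.empty := by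
    apply PySem.List.foldl_congr_mem
    intro acc x hx
    rw [if_pos (hpre x hx), pvOrderIndex_eq]
    rfl
  rw [hbuck]
  set buckC := keys.foldl (fun d key => d.modify (pvDate key) (List.replicate 6 [])
      (fun slots => slots.set (pvIdx key) (slots.getD (pvIdx key) [] ++ [key])))
      PySem.Dict.empty with hbuckC
  have hnodup : buckC.keys.Nodup := by
    rw [hbuckC]
    exact PySem.Dict.nodup_keys_foldl_modify_key keys pvDate (List.replicate 6 [])
      (fun _ x => fun slots => slots.set (pvIdx x) (slots.getD (pvIdx x) [] ++ [x]))
      PySem.Dict.empty (by simp)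
  have hfresh := PySem.Dict.items_foldl_insert_fresh buckC.items (fun p => p.1)
    (fun p => p.2.flatten) PySem.Dict.empty (fun a _ => PySem.Dict.contains_empty _)
    (by simpa [PySem.Dict.keys] using hnodup)
  rw [hfresh]
  rw [PySem.Dict.items_eq_map_keys buckC hnodup (List.replicate 6 [])]
  have hkeys : buckC.keys = pvDates keys := by
    rw [hbuckC]
    rw [PySem.Dict.keys_foldl_modify_key keys pvDate (List.replicate 6 [])
      (fun _ x => fun slots => slots.set (pvIdx x) (slots.getD (pvIdx x) [] ++ [x]))
      PySem.Dict.empty]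
    simp [pvDates, PySem.Dict.keys_empty]
  rw [hkeys, List.map_map]
  have hitems : PySem.Dict.empty.items = ([] : List (String × List String)) := rfl
  rw [hitems, List.nil_append]
  apply List.map_congr_left
  intro c _
  have hgetD : buckC.getD c (List.replicate 6 [])
      = (List.range 6).map (fun i => (pvDayKeys keys c).filter (fun k => pvIdx k == i)) := by
    rw [hbuckC, getD_foldl_modify_key_filter keys pvDate (List.replicate 6 [])
      (fun x => fun slots => slots.set (pvIdx x) (slots.getD (pvIdx x) [] ++ [x]))
      PySem.Dict.empty c, PySem.Dict.getD_empty]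
    have hrep : List.replicate 6 ([] : List String) = (List.range 6).map (fun _ => []) := by simp
    rw [hrep, slots_foldl]
    simp [pvDayKeys]
  show (c, (buckC.getD c (List.replicate 6 [])).flatten) = _
  rw [hgetD]

-- ===== VERDICT (by name: the statement is the Claim_ definition above) =====
theorem group_keys_by_day_spec : Claim_equal_group_keys_by_day := by
  intro keys _hdom hpre
  unfold Spec_group_keys_by_day
  rw [portA_eq keys hpre, portB_eq keys hpre]
  apply List.map_congr_left
  intro c _
  rw [value_eq]
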